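-- pv_equiv track=rewrite | github.com/pypi-data/pypi-mirror-301 | packages/butterfly-cli/butterfly_cli-0.0.1-py3-none-any.whl/agents/static_agent.py | should_analyze_file
-- ===== SOURCE A (Python) =====
-- import fnmatch
--
-- def should_analyze_file(file_path):
--     patterns_to_analyze = [
--         '*.py', '*.js', '*.ts', '*.php', '*.rb', '*.java', '*.go', '*.cs',
--         '*.html', '*.css', '*.scss', '*.jsx', '*.tsx',
--         '*.sql',
--         'Dockerfile', 'docker-compose.yml',
--         '*.xml', '*.json', '*.yaml', '*.yml',
--         '*.c', '*.cpp', '*.h', '*.hpp',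
--         '*.rs', '*.scala', '*.kt', '*.swift',
--         '*.sh', '*.bash', '*.ps1'
--     ]
--
--     return any(fnmatch.fnmatch(file_path, pattern) for pattern in patterns_to_analyze)
-- ===== SOURCE B (Python) =====
-- EXTS = {
--     '.py', '.js', '.ts', '.php', '.rb', '.java', '.go', '.cs',
--     '.html', '.css', '.scss', '.jsx', '.tsx',
--     '.sql',
--     '.xml', '.json', '.yaml', '.yml',
--     '.c', '.cpp', '.h', '.hpp',
--     '.rs', '.scala', '.kt', '.swift',
--     '.sh', '.bash', '.ps1',
-- }
-- NAMES = {'Dockerfile', 'docker-compose.yml'}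
--
-- def should_analyze_file(file_path):
--     if file_path in NAMES:
--         return True
--     i = file_path.rfind('.')
--     return i != -1 and file_path[i:] in EXTS
-- ===== Notes on version B (the rewrite author's own statement) =====
-- stated objective: idiomatic
-- what changed: Replaces the per-call scan of 31 fnmatch patterns by two module-level constant sets (exact filenames and extensions) and a single lookup of the suffix starting at the last dot.
import Mathlib
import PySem

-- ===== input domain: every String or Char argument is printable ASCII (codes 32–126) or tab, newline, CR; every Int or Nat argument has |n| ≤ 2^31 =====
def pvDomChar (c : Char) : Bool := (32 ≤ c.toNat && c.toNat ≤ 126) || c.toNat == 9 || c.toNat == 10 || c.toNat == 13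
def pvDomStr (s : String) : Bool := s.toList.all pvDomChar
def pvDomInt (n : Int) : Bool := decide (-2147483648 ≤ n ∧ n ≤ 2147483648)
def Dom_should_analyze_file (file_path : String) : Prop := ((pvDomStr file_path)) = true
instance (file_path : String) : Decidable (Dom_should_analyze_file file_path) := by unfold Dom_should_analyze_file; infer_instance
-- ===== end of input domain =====

-- B replaces A's 31-pattern fnmatch scan by two constant sets (exact filenames / extensions)
-- and a single rfind('.')-suffix lookup; same return value, more idiomatic.

-- ===== PORT A =====
-- fnmatch.fnmatch for patterns built only from '*' and literal characters (A's 31 patterns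
-- contain no '?' or '[...]', and on POSIX os.path.normcase is the identity): exact there.
def pvFnmatch : List Char → List Char → Bool
  | s, [] => s.isEmpty
  | [], q :: p => if q = '*' then pvFnmatch [] p else false
  | c :: s, q :: p =>
      if q = '*' then (pvFnmatch (c :: s) p || pvFnmatch s (q :: p))
      else (decide (q = c) && pvFnmatch s p)
termination_by s p => (p.length, s.length)

def pvPatterns : List (List Char) :=
  [['*', '.', 'p', 'y'],
   ['*', '.', 'j', 's'],
   ['*', '.', 't', 's'],
   ['*', '.', 'p', 'h', 'p'],
   ['*', '.', 'r', 'b'],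
   ['*', '.', 'j', 'a', 'v', 'a'],
   ['*', '.', 'g', 'o'],
   ['*', '.', 'c', 's'],
   ['*', '.', 'h', 't', 'm', 'l'],
   ['*', '.', 'c', 's', 's'],
   ['*', '.', 's', 'c', 's', 's'],
   ['*', '.', 'j', 's', 'x'],
   ['*', '.', 't', 's', 'x'],
   ['*', '.', 's', 'q', 'l'],
   ['D', 'o', 'c', 'k', 'e', 'r', 'f', 'i', 'l', 'e'],
   ['d', 'o', 'c', 'k', 'e', 'r', '-', 'c', 'o', 'm', 'p', 'o', 's', 'e', '.', 'y', 'm', 'l'],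
   ['*', '.', 'x', 'm', 'l'],
   ['*', '.', 'j', 's', 'o', 'n'],
   ['*', '.', 'y', 'a', 'm', 'l'],
   ['*', '.', 'y', 'm', 'l'],
   ['*', '.', 'c'],
   ['*', '.', 'c', 'p', 'p'],
   ['*', '.', 'h'],
   ['*', '.', 'h', 'p', 'p'],
   ['*', '.', 'r', 's'],
   ['*', '.', 's', 'c', 'a', 'l', 'a'],
   ['*', '.', 'k', 't'],
   ['*', '.', 's', 'w', 'i', 'f', 't'],
   ['*', '.', 's', 'h'],
   ['*', '.', 'b', 'a', 's', 'h'],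
   ['*', '.', 'p', 's', '1']]

def should_analyze_file (file_path : String) : Bool :=
  pvPatterns.any (fun pat => pvFnmatch file_path.toList pat)

-- ===== PORT B =====
def pvEXTS : List (List Char) :=
  [['.', 'p', 'y'],
   ['.', 'j', 's'],
   ['.', 't', 's'],
   ['.', 'p', 'h', 'p'],
   ['.', 'r', 'b'],
   ['.', 'j', 'a', 'v', 'a'],
   ['.', 'g', 'o'],
   ['.', 'c', 's'],
   ['.', 'h', 't', 'm', 'l'],
   ['.', 'c', 's', 's'],
   ['.', 's', 'c', 's', 's'],
   ['.', 'j', 's', 'x'],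
   ['.', 't', 's', 'x'],
   ['.', 's', 'q', 'l'],
   ['.', 'x', 'm', 'l'],
   ['.', 'j', 's', 'o', 'n'],
   ['.', 'y', 'a', 'm', 'l'],
   ['.', 'y', 'm', 'l'],
   ['.', 'c'],
   ['.', 'c', 'p', 'p'],
   ['.', 'h'],
   ['.', 'h', 'p', 'p'],
   ['.', 'r', 's'],
   ['.', 's', 'c', 'a', 'l', 'a'],
   ['.', 'k', 't'],
   ['.', 's', 'w', 'i', 'f', 't'],
   ['.', 's', 'h'],
   ['.', 'b', 'a', 's', 'h'],
   ['.', 'p', 's', '1']]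

def pvNAMES : List (List Char) :=
  [['D', 'o', 'c', 'k', 'e', 'r', 'f', 'i', 'l', 'e'], ['d', 'o', 'c', 'k', 'e', 'r', '-', 'c', 'o', 'm', 'p', 'o', 's', 'e', '.', 'y', 'm', 'l']]

-- scans the reversed string: mirrors i = file_path.rfind('.') and the slice file_path[i:]
-- (returns none exactly when rfind gives -1, else the suffix from the last '.')
def pvLastDotSuffix : List Char → List Char → Option (List Char)
  | [], _ => none
  | c :: r, acc => if c = '.' then some ('.' :: acc) else pvLastDotSuffix r (c :: acc)

-- "return i != -1 and file_path[i:] in EXTS"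
def pvExtCheck (l : List Char) : Bool :=
  match pvLastDotSuffix l.reverse [] with
  | some ext => pvEXTS.contains ext
  | none => false

def should_analyze_file_alt (file_path : String) : Bool :=
  if pvNAMES.contains file_path.toList then true
  else pvExtCheck file_path.toList

-- ===== PRECONDITION & SPEC =====
def Spec_should_analyze_file (file_path : String) (out : Bool) : Prop := out = should_analyze_file_alt file_path
instance (file_path : String) (out : Bool) : Decidable (Spec_should_analyze_file file_path out) := by unfold Spec_should_analyze_file; infer_instance

-- ===== CLAIM (what is proved, stated in full; the proofs are below) =====
def Claim_equal_should_analyze_file : Prop := ∀ (file_path : String), Dom_should_analyze_file file_path → Spec_should_analyze_file file_path (should_analyze_file file_path)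

-- ===== LEMMAS AND PROOFS =====

-- a star-free pattern matches exactly itself
theorem pv_fnmatch_exact (s p : List Char) (hp : '*' ∉ p) :
    pvFnmatch s p = decide (s = p) := by
  induction p generalizing s with
  | nil => cases s <;> simp [pvFnmatch]
  | cons q p ih =>
    have hq : q ≠ '*' := fun h => hp (h ▸ List.mem_cons_self)
    have hp' : '*' ∉ p := fun h => hp (List.mem_cons_of_mem _ h)
    cases s with
    | nil => simp [pvFnmatch, hq]
    | cons c s =>
      simp only [pvFnmatch, if_neg hq, ih s hp', List.cons.injEq]
      by_cases hc : q = c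
      · subst hc; simp
      · simp [hc]
        intro h h'
        exact hc h.symm

-- '*'-prefixed star-free pattern matches exactly the strings with that suffix
theorem pv_fnmatch_star (s p : List Char) (hp : '*' ∉ p) :
    pvFnmatch s ('*' :: p) = decide (p <:+ s) := by
  induction s with
  | nil =>
    simp only [pvFnmatch, pv_fnmatch_exact [] p hp]
    simp [List.suffix_nil, eq_comm]
  | cons c s ih =>
    simp only [pvFnmatch, ih, pv_fnmatch_exact (c :: s) p hp]
    simp [List.suffix_cons_iff, eq_comm]

theorem pv_lastdot_app (r t acc : List Char) (hr : '.' ∉ r) :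
    pvLastDotSuffix (r ++ '.' :: t) acc = some ('.' :: (r.reverse ++ acc)) := by
  induction r generalizing acc with
  | nil => simp [pvLastDotSuffix]
  | cons c r ih =>
    have hc : c ≠ '.' := fun h => hr (h ▸ List.mem_cons_self)
    have hr' : '.' ∉ r := fun h => hr (List.mem_cons_of_mem _ h)
    simp [pvLastDotSuffix, hc, ih _ hr']

theorem pv_lastdot_spec (rl : List Char) :
    ∀ acc u, pvLastDotSuffix rl acc = some u →
      ∃ p q, rl = p ++ '.' :: q ∧ u = '.' :: (p.reverse ++ acc) := by
  induction rl with
  | nil => intro acc u h; simp [pvLastDotSuffix] at h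
  | cons c r ih =>
    intro acc u h
    by_cases hc : c = '.'
    · subst hc
      simp [pvLastDotSuffix] at h
      exact ⟨[], r, rfl, by simp [h.symm]⟩
    · simp [pvLastDotSuffix, hc] at h
      obtain ⟨p, q, h1, h2⟩ := ih (c :: acc) u h
      exact ⟨c :: p, q, by simp [h1], by simp [h2]⟩

-- every extension in pvEXTS is '.' followed by a dot-free tail
theorem pv_ext_shape : ∀ e ∈ pvEXTS, e.head? = some '.' ∧ '.' ∉ e.tail := by decide

theorem pv_suffix_to_lastdot (e l : List Char) (he : e ∈ pvEXTS) (h : e <:+ l) :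
    pvLastDotSuffix l.reverse [] = some e := by
  obtain ⟨hh, ht⟩ := pv_ext_shape e he
  obtain ⟨a, rfl⟩ := h
  obtain ⟨c, t, rfl⟩ : ∃ c t, e = c :: t := by
    cases e with
    | nil => simp at hh
    | cons c t => exact ⟨c, t, rfl⟩
  obtain rfl : c = '.' := by simpa using hh
  have ht' : '.' ∉ t.reverse := by simpa using ht
  have := pv_lastdot_app t.reverse a.reverse [] ht'
  simp only [List.reverse_append, List.reverse_cons] at *
  simpa using this

theorem pv_lastdot_suffix (l u : List Char)
    (h : pvLastDotSuffix l.reverse [] = some u) : u <:+ l := by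
  obtain ⟨p, q, h1, h2⟩ := pv_lastdot_spec l.reverse [] u h
  have hl : l = q.reverse ++ '.' :: p.reverse := by
    have := congrArg List.reverse h1
    simpa using this
  exact ⟨q.reverse, by rw [h2, hl]; simp⟩

theorem pv_extcheck_eq (l : List Char) :
    pvExtCheck l = pvEXTS.any (fun e => decide (e <:+ l)) := by
  unfold pvExtCheck
  cases h : pvLastDotSuffix l.reverse [] with
  | none =>
    symm
    simp only [List.any_eq_false, decide_eq_true_eq]
    intro e he hs
    rw [pv_suffix_to_lastdot e l he hs] at h
    exact absurd h (by simp)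
  | some u =>
    by_cases hu : u ∈ pvEXTS
    · have h1 : pvEXTS.contains u = true := by simpa using hu
      have h2 : pvEXTS.any (fun e => decide (e <:+ l)) = true := by
        simp only [List.any_eq_true, decide_eq_true_eq]
        exact ⟨u, hu, pv_lastdot_suffix l u h⟩
      show pvEXTS.contains u = pvEXTS.any fun e => decide (e <:+ l)
      rw [h1, h2]
    · have h1 : pvEXTS.contains u = false := by simpa using hu
      have h2 : pvEXTS.any (fun e => decide (e <:+ l)) = false := by
        simp only [List.any_eq_false, decide_eq_true_eq]
        intro e he hs
        have he' := pv_suffix_to_lastdot e l he hs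
        rw [he'] at h
        injection h with h3
        exact hu (h3 ▸ he)
      show pvEXTS.contains u = pvEXTS.any fun e => decide (e <:+ l)
      rw [h1, h2]

theorem pv_main (l : List Char) :
    pvPatterns.any (fun pat => pvFnmatch l pat) =
      (if pvNAMES.contains l then true else pvExtCheck l) := by
  simp only [pvPatterns, List.any_cons, List.any_nil, Bool.or_false]
  rw [pv_fnmatch_star l ['.', 'p', 'y'] (by decide),
      pv_fnmatch_star l ['.', 'j', 's'] (by decide),
      pv_fnmatch_star l ['.', 't', 's'] (by decide),
      pv_fnmatch_star l ['.', 'p', 'h', 'p'] (by decide),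
      pv_fnmatch_star l ['.', 'r', 'b'] (by decide),
      pv_fnmatch_star l ['.', 'j', 'a', 'v', 'a'] (by decide),
      pv_fnmatch_star l ['.', 'g', 'o'] (by decide),
      pv_fnmatch_star l ['.', 'c', 's'] (by decide),
      pv_fnmatch_star l ['.', 'h', 't', 'm', 'l'] (by decide),
      pv_fnmatch_star l ['.', 'c', 's', 's'] (by decide),
      pv_fnmatch_star l ['.', 's', 'c', 's', 's'] (by decide),
      pv_fnmatch_star l ['.', 'j', 's', 'x'] (by decide),
      pv_fnmatch_star l ['.', 't', 's', 'x'] (by decide),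
      pv_fnmatch_star l ['.', 's', 'q', 'l'] (by decide),
      pv_fnmatch_exact l ['D', 'o', 'c', 'k', 'e', 'r', 'f', 'i', 'l', 'e'] (by decide),
      pv_fnmatch_exact l ['d', 'o', 'c', 'k', 'e', 'r', '-', 'c', 'o', 'm', 'p', 'o', 's', 'e', '.', 'y', 'm', 'l'] (by decide),
      pv_fnmatch_star l ['.', 'x', 'm', 'l'] (by decide),
      pv_fnmatch_star l ['.', 'j', 's', 'o', 'n'] (by decide),
      pv_fnmatch_star l ['.', 'y', 'a', 'm', 'l'] (by decide),
      pv_fnmatch_star l ['.', 'y', 'm', 'l'] (by decide),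
      pv_fnmatch_star l ['.', 'c'] (by decide),
      pv_fnmatch_star l ['.', 'c', 'p', 'p'] (by decide),
      pv_fnmatch_star l ['.', 'h'] (by decide),
      pv_fnmatch_star l ['.', 'h', 'p', 'p'] (by decide),
      pv_fnmatch_star l ['.', 'r', 's'] (by decide),
      pv_fnmatch_star l ['.', 's', 'c', 'a', 'l', 'a'] (by decide),
      pv_fnmatch_star l ['.', 'k', 't'] (by decide),
      pv_fnmatch_star l ['.', 's', 'w', 'i', 'f', 't'] (by decide),
      pv_fnmatch_star l ['.', 's', 'h'] (by decide),
      pv_fnmatch_star l ['.', 'b', 'a', 's', 'h'] (by decide),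
      pv_fnmatch_star l ['.', 'p', 's', '1'] (by decide)]
  rw [pv_extcheck_eq]
  simp only [pvEXTS, pvNAMES, List.any_cons, List.any_nil, Bool.or_false]
  simp only [List.contains_cons, List.contains_nil, Bool.or_false]
  by_cases h1 : l = ['D', 'o', 'c', 'k', 'e', 'r', 'f', 'i', 'l', 'e'] <;>
    by_cases h2 : l = ['d', 'o', 'c', 'k', 'e', 'r', '-', 'c', 'o', 'm', 'p', 'o', 's', 'e', '.', 'y', 'm', 'l'] <;>
    simp [h1, h2]

-- ===== VERDICT (by name: the statement is the Claim_ definition above) =====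
theorem should_analyze_file_spec : Claim_equal_should_analyze_file := by
  intro fp _
  unfold Spec_should_analyze_file should_analyze_file should_analyze_file_alt
  exact pv_main fp.toList
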